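-- pv_equiv track=rewrite | github.com/berksudan/Useful-Tiny-Scripts | anki_card_tooling/anki_deutsch_deu_to_eng_card_adder.py | build_translation_dict
-- ===== SOURCE A (Python) =====
-- from typing import (
--     Final,
--     List,
--     Tuple,
--     Dict,
--     Set,
--     Pattern,
-- )
--
-- def build_translation_dict(
--     pairs: List[Tuple[str, str]]
-- ) -> Dict[str, str]:
--     """
--     Build a dict mapping each English word (or phrase) to its German translations,
--     joined by ' | ' if multiple.
--     """
--     temp: Dict[str, Set[str]] = {}
--     for en, de in pairs:
--         for w in en.split(" | "):
--             key = w.strip()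
--             temp.setdefault(key, set()).add(de)
--     return {en: " | ".join(sorted(dset)) for en, dset in temp.items()}
-- ===== SOURCE B (Python) =====
-- def build_translation_dict(pairs):
--     # Expand once into a flat (english-key, german) list, take keys in first-occurrence
--     # order, and build each value by a per-key comprehension over the flat list.
--     flat = [(w.strip(), de) for en, de in pairs for w in en.split(" | ")]
--     keys = list(dict.fromkeys(k for k, _ in flat))
--     return {k: " | ".join(sorted({de for kk, de in flat if kk == k})) for k in keys}
-- ===== Notes on version B (the rewrite author's own statement) =====
-- stated objective: alternative
-- what changed: Replaces the single-pass dict-of-sets accumulation with a flatten-then-group formulation: expand pairs once into a flat (key, de) list, dedup the keys in first-occurrence order, and compute each value by filtering the flat list per key.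
import Mathlib
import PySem

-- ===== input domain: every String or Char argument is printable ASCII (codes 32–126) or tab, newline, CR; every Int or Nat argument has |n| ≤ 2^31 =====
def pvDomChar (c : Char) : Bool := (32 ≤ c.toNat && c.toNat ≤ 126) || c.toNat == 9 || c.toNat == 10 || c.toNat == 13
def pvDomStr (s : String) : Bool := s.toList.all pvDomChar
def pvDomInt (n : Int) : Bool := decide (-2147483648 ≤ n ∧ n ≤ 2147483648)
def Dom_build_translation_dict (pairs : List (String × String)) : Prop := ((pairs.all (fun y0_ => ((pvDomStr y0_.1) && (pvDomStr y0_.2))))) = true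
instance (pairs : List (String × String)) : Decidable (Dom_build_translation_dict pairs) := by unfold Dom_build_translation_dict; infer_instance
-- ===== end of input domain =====

-- B replaces A's single-pass dict-of-sets grouping by a flatten / dedup-keys / filter-per-key
-- formulation of the same dictionary (alternative structure, same results).


-- ===== PORT A =====
-- en.split(" | ") with the literal separator " | " (nonempty, so split? never returns none)
def pySplitBar (s : String) : List String := (PySem.Str.split? s " | ").getD []

def build_translation_dict (pairs : List (String × String)) : List (String × String) :=
  let temp : PySem.Dict String (PySem.Set String) :=
    pairs.foldl (fun d p =>
      (pySplitBar p.1).foldl (fun d w =>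
        d.modify (PySem.Str.strip w) PySem.Set.empty (fun s => PySem.Set.add s p.2)) d)
      PySem.Dict.empty
  temp.items.map (fun q => (q.1, PySem.Str.join " | " (PySem.List.sorted q.2 (fun x => x) false)))

-- ===== PORT B =====
def build_translation_dict_alt (pairs : List (String × String)) : List (String × String) :=
  let flat := pairs.flatMap (fun p =>
    (pySplitBar p.1).map (fun w => (PySem.Str.strip w, p.2)))
  let keys := PySem.List.dedup (flat.map Prod.fst)
  keys.map (fun k => (k, PySem.Str.join " | "
    (PySem.List.sorted (PySem.Set.ofList ((flat.filter (fun q => q.1 == k)).map Prod.snd)) (fun x => x) false)))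

-- ===== PRECONDITION & SPEC =====
def Spec_build_translation_dict (pairs : List (String × String)) (out : List (String × String)) : Prop := out = build_translation_dict_alt pairs
instance (pairs : List (String × String)) (out : List (String × String)) : Decidable (Spec_build_translation_dict pairs out) := by unfold Spec_build_translation_dict; infer_instance

-- ===== CLAIM (what is proved, stated in full; the proofs are below) =====
def Claim_equal_build_translation_dict : Prop := ∀ (pairs : List (String × String)), Dom_build_translation_dict pairs → Spec_build_translation_dict pairs (build_translation_dict pairs)

-- ===== LEMMAS AND PROOFS =====

-- the value accumulated at key k by A's modify-loop is exactly the set of the de's paired with k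
lemma getD_foldl_modify_add (l : List (String × String))
    (d : PySem.Dict String (PySem.Set String)) (k : String) :
    (l.foldl (fun d q => d.modify q.1 PySem.Set.empty (fun s => PySem.Set.add s q.2)) d).getD k PySem.Set.empty
      = PySem.Set.update (d.getD k PySem.Set.empty) ((l.filter (fun q => q.1 == k)).map Prod.snd) := by
  induction l generalizing d with
  | nil => simp [PySem.Set.update]
  | cons q t ih =>
    simp only [List.foldl_cons, ih, PySem.Dict.getD_modify, List.filter_cons]
    by_cases h : q.1 = k
    · simp [h, PySem.Set.update_cons]
    · simp [h, Ne.symm h]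

theorem build_translation_dict_spec_aux (pairs : List (String × String)) :
    build_translation_dict pairs = build_translation_dict_alt pairs := by
  unfold build_translation_dict build_translation_dict_alt
  -- name the flat (key, de) list
  set flat := pairs.flatMap (fun p =>
    (pySplitBar p.1).map (fun w => (PySem.Str.strip w, p.2))) with hflat
  -- A's nested loops are one fold over flat
  have hfold :
      pairs.foldl (fun d p =>
        (pySplitBar p.1).foldl (fun d w =>
          d.modify (PySem.Str.strip w) PySem.Set.empty (fun s => PySem.Set.add s p.2)) d)
        PySem.Dict.empty
      = flat.foldl (fun d q => d.modify q.1 PySem.Set.empty (fun s => PySem.Set.add s q.2))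
          PySem.Dict.empty := by
    rw [hflat, List.foldl_flatMap]
    simp only [List.foldl_map]
  simp only [hfold]
  -- keys of the accumulated dict = first-occurrence dedup of flat's keys
  have hkeys :
      (flat.foldl (fun d q => d.modify q.1 PySem.Set.empty (fun s => PySem.Set.add s q.2))
        PySem.Dict.empty).keys = PySem.Set.ofList (flat.map Prod.fst) := by
    rw [PySem.Dict.keys_foldl_modify_key flat Prod.fst PySem.Set.empty
      (fun _ x s => PySem.Set.add s x.2) PySem.Dict.empty]
    simp [PySem.Set.update_nil_left, PySem.Dict.keys_empty]
  have hnd :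
      (flat.foldl (fun d q => d.modify q.1 PySem.Set.empty (fun s => PySem.Set.add s q.2))
        PySem.Dict.empty).keys.Nodup := by
    exact PySem.Dict.nodup_keys_foldl_modify_key flat Prod.fst PySem.Set.empty
      (fun _ x s => PySem.Set.add s x.2) PySem.Dict.empty (by simp [PySem.Dict.keys_empty])
  rw [PySem.Dict.items_eq_map_keys _ hnd PySem.Set.empty, List.map_map, hkeys,
    PySem.List.dedup_eq_ofList]
  refine List.map_congr_left ?_
  intro k _
  simp only [Function.comp_apply]
  rw [getD_foldl_modify_add]
  simp [PySem.Set.update_nil_left, PySem.Dict.getD_empty]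

-- ===== VERDICT (by name: the statement is the Claim_ definition above) =====
theorem build_translation_dict_spec : Claim_equal_build_translation_dict := by
  intro pairs _
  exact build_translation_dict_spec_aux pairs
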